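-- pv_equiv track=rewrite | github.com/zion928/-_-_- | util.py | get_max_tier_and_rank
-- ===== SOURCE A (Python) =====
-- from typing import List, Dict, Union, Optional
--
-- def tier_rank_to_value(tier: str, rank: Union[int, None]) -> int:
--     tier_values = {
--         "IRON": 0,
--         "BRONZE": 700,
--         "SILVER": 1500,
--         "GOLD": 2500,
--         "PLATINUM": 4000,
--         "DIAMOND": 6000,
--         "MASTER": 7000,
--         "GRANDMASTER": 7250,
--         "CHALLENGER": 7500,
--     }
--     rank_values = {
--         "IV": 4,
--         "III": 3,
--         "II": 2,
--         "I": 1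
--     }
--     if tier in tier_values:
--         if rank:
--             return tier_values[tier] + rank_values[rank] * 100
--         else:
--             return tier_values[tier]
--     else:
--         return 0
--
-- def get_max_tier_and_rank(tiers: List[str], ranks: List[str]) -> tuple[str, str]:
--     max_value = -1
--     max_tier = ""
--     max_rank = ""
--
--     for tier, rank in zip(tiers, ranks):
--         value = tier_rank_to_value(tier, rank)
--         if value > max_value:
--             max_value = value
--             max_tier = tier
--             max_rank = rank
--
--     return max_tier, max_rank
-- ===== SOURCE B (Python) =====
-- def tier_rank_to_value(tier, rank):
--     tier_values = {
--         "IRON": 0,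
--         "BRONZE": 700,
--         "SILVER": 1500,
--         "GOLD": 2500,
--         "PLATINUM": 4000,
--         "DIAMOND": 6000,
--         "MASTER": 7000,
--         "GRANDMASTER": 7250,
--         "CHALLENGER": 7500,
--     }
--     rank_values = {"IV": 4, "III": 3, "II": 2, "I": 1}
--     if tier in tier_values:
--         if rank:
--             return tier_values[tier] + rank_values[rank] * 100
--         else:
--             return tier_values[tier]
--     else:
--         return 0
--
-- def get_max_tier_and_rank(tiers, ranks):
--     values = [tier_rank_to_value(t, r) for t, r in zip(tiers, ranks)]
--     if not values:
--         return "", ""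
--     m = max(values)
--     idx = values.index(m)
--     return tiers[idx], ranks[idx]
-- ===== Notes on version B (the rewrite author's own statement) =====
-- stated objective: idiomatic
-- what changed: Replaces the single argmax-tracking loop with three builtin passes: build the value table, take max(values), find its first index with values.index, and return tiers[idx], ranks[idx]; first-occurrence tie-breaking is preserved because .index returns the first maximum.
import Mathlib
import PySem

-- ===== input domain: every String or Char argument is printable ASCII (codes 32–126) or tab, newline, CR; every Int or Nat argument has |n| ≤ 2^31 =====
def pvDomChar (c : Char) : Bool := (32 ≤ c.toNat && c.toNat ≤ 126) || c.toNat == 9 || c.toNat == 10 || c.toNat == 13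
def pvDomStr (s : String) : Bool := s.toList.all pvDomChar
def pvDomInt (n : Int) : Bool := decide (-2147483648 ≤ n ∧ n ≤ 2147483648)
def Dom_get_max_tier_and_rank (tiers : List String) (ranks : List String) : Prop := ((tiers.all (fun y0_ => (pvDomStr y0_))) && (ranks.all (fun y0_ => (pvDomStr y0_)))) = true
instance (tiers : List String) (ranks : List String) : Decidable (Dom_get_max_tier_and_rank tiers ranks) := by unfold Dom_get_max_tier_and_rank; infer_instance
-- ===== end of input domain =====

-- B replaces A's argmax-tracking loop with the idiomatic build-table / max / first-index decomposition; equal output proved on Pre_.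

-- ===== PORT A =====
-- shared module helper tier_rank_to_value; none = KeyError (rank truthy but not a rank key while tier is a tier key)
-- dict literals as association lists; pyLookup = Python dict lookup (first match) on them
def tierAList : List (String × Int) :=
  [("IRON", 0), ("BRONZE", 700), ("SILVER", 1500), ("GOLD", 2500), ("PLATINUM", 4000),
   ("DIAMOND", 6000), ("MASTER", 7000), ("GRANDMASTER", 7250), ("CHALLENGER", 7500)]

def rankAList : List (String × Int) := [("IV", 4), ("III", 3), ("II", 2), ("I", 1)]

def pyLookup (d : List (String × Int)) (k : String) : Option Int :=
  (d.find? (fun e => e.1 == k)).map (fun e => e.2)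

def tier_rank_to_value? (tier : String) (rank : String) : Option Int :=
  match pyLookup tierAList tier with
  | some tv => if rank = "" then some tv else (pyLookup rankAList rank).map (fun rv => tv + rv * 100)
  | none => some 0

def get_max_tier_and_rank (tiers : List String) (ranks : List String) : String × String :=
  match (tiers.zip ranks).foldl
      (fun st p =>
        match st with
        | none => none
        | some (mv, mt, mr) =>
          match tier_rank_to_value? p.1 p.2 with
          | none => none
          | some v => if v > mv then some (v, p.1, p.2) else some (mv, mt, mr))
      (some ((-1 : Int), "", "")) with
  | some (_, mt, mr) => (mt, mr)
  | none => ("", "")   -- unreachable under Pre_ (the Python raises KeyError there)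

-- ===== PORT B =====
def get_max_tier_and_rank_alt (tiers : List String) (ranks : List String) : String × String :=
  match (tiers.zip ranks).mapM (fun p => tier_rank_to_value? p.1 p.2) with
  | none => ("", "")   -- unreachable under Pre_ (the Python raises KeyError there)
  | some values =>
    if values.isEmpty then ("", "")
    else
      match PySem.List.max? values (fun v => v) with
      | none => ("", "")   -- unreachable: values nonempty
      | some m =>
        match PySem.List.index? values m with
        | none => ("", "")   -- unreachable: m ∈ values
        | some idx =>
          match PySem.List.pyGet? tiers (idx : Int), PySem.List.pyGet? ranks (idx : Int) with
          | some t, some r => (t, r)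
          | _, _ => ("", "")   -- unreachable: idx < len(values) ≤ min length

-- ===== PRECONDITION & SPEC =====
-- Pre_ excludes exactly the inputs on which the Python raises KeyError: a zipped pair whose
-- tier is a tier key while its rank is nonempty and not one of "IV","III","II","I".
def Pre_get_max_tier_and_rank (tiers : List String) (ranks : List String) : Prop :=
  ∀ p ∈ tiers.zip ranks,
    p.1 ∈ ["IRON", "BRONZE", "SILVER", "GOLD", "PLATINUM", "DIAMOND", "MASTER", "GRANDMASTER", "CHALLENGER"] →
      (p.2 = "" ∨ p.2 ∈ ["IV", "III", "II", "I"])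
instance (tiers : List String) (ranks : List String) : Decidable (Pre_get_max_tier_and_rank tiers ranks) := by unfold Pre_get_max_tier_and_rank; infer_instance

def pvWitness_get_max_tier_and_rank : List String × List String := (["GOLD", "IRON", "x"], ["II", "", "zz"])

def Spec_get_max_tier_and_rank (tiers : List String) (ranks : List String) (out : String × String) : Prop := out = get_max_tier_and_rank_alt tiers ranks
instance (tiers : List String) (ranks : List String) (out : String × String) : Decidable (Spec_get_max_tier_and_rank tiers ranks out) := by unfold Spec_get_max_tier_and_rank; infer_instance

-- ===== CLAIM (what is proved, stated in full; the proofs are below) =====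
def Claim_equal_get_max_tier_and_rank : Prop := ∀ (tiers : List String) (ranks : List String), Dom_get_max_tier_and_rank tiers ranks → Pre_get_max_tier_and_rank tiers ranks → Spec_get_max_tier_and_rank tiers ranks (get_max_tier_and_rank tiers ranks)

-- ===== LEMMAS AND PROOFS =====

-- the pure (Option-free) version of A's loop over pairs-with-values
def loopA (ws : List ((String × String) × Int)) (c : Int × String × String) : Int × String × String :=
  ws.foldl (fun c w => if w.2 > c.1 then (w.2, w.1.1, w.1.2) else c) c

-- first-argmax, computed top-down (proof-side reference function)
def pick : List ((String × String) × Int) → Option ((String × String) × Int)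
  | [] => none
  | w :: ws =>
    match pick ws with
    | none => some w
    | some u => some (if u.2 > w.2 then u else w)

lemma lookup_tier_nonneg (t : String) (v : Int) (h : pyLookup tierAList t = some v) : 0 ≤ v := by
  unfold pyLookup at h
  rcases Option.map_eq_some_iff.mp h with ⟨e, hf, he⟩
  have hm := List.mem_of_find?_eq_some hf
  unfold tierAList at hm
  simp only [List.mem_cons, List.not_mem_nil, or_false] at hm
  rcases hm with h1|h1|h1|h1|h1|h1|h1|h1|h1 <;> subst h1 <;> simp at he <;> omega

lemma lookup_rank_nonneg (r : String) (v : Int) (h : pyLookup rankAList r = some v) : 0 ≤ v := by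
  unfold pyLookup at h
  rcases Option.map_eq_some_iff.mp h with ⟨e, hf, he⟩
  have hm := List.mem_of_find?_eq_some hf
  unfold rankAList at hm
  simp only [List.mem_cons, List.not_mem_nil, or_false] at hm
  rcases hm with h1|h1|h1|h1 <;> subst h1 <;> simp at he <;> omega

lemma trv_nonneg (t r : String) (v : Int) (h : tier_rank_to_value? t r = some v) : 0 ≤ v := by
  cases hT : pyLookup tierAList t with
  | none =>
    simp only [tier_rank_to_value?, hT] at h
    cases h
    omega
  | some tv =>
    have htv : 0 ≤ tv := lookup_tier_nonneg t tv hT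
    by_cases hr : r = ""
    · simp only [tier_rank_to_value?, hT, if_pos hr] at h
      cases h
      omega
    · simp only [tier_rank_to_value?, hT, if_neg hr] at h
      cases hR : pyLookup rankAList r with
      | none => rw [hR] at h; simp at h
      | some rv =>
        have hrv : 0 ≤ rv := lookup_rank_nonneg r rv hR
        rw [hR] at h
        simp at h
        omega

lemma fold_none :
    ∀ (ps : List (String × String)),
      ps.foldl
        (fun st p =>
          match st with
          | none => none
          | some (mv, mt, mr) =>
            match tier_rank_to_value? p.1 p.2 with
            | none => none
            | some v => if v > mv then some (v, p.1, p.2) else some (mv, mt, mr))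
        none = none := by
  intro ps
  induction ps with
  | nil => rfl
  | cons p ps ih => simpa [List.foldl_cons] using ih

lemma mapM_some_len (g : (String × String) → Option Int) :
    ∀ (ps : List (String × String)) (vs : List Int), ps.mapM g = some vs → vs.length = ps.length := by
  intro ps
  induction ps with
  | nil => intro vs h; simp at h; subst h; rfl
  | cons p ps ih =>
    intro vs h
    rw [List.mapM_cons] at h
    cases hg : g p with
    | none => rw [hg] at h; simp at h
    | some v =>
      cases hm : ps.mapM g with
      | none => rw [hg, hm] at h; simp at h
      | some vs' =>
        rw [hg, hm] at h; simp at h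
        rw [← h]; simp [ih vs' hm]

lemma mapM_some_nonneg :
    ∀ (ps : List (String × String)) (vs : List Int),
      ps.mapM (fun p => tier_rank_to_value? p.1 p.2) = some vs → ∀ v ∈ vs, 0 ≤ v := by
  intro ps
  induction ps with
  | nil => intro vs h; simp at h; subst h; intro v hv; simp at hv
  | cons p ps ih =>
    intro vs h
    rw [List.mapM_cons] at h
    cases hg : tier_rank_to_value? p.1 p.2 with
    | none => rw [hg] at h; simp at h
    | some v =>
      cases hm : ps.mapM (fun p => tier_rank_to_value? p.1 p.2) with
      | none => rw [hg, hm] at h; simp at h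
      | some vs' =>
        rw [hg, hm] at h; simp at h
        intro x hx
        rw [← h] at hx
        rcases List.mem_cons.mp hx with hx | hx
        · exact hx ▸ trv_nonneg _ _ _ hg
        · exact ih vs' hm x hx

-- Option plumbing: A's optional fold is the pure fold when mapM succeeds, none when it fails
lemma plumb_some :
    ∀ (ps : List (String × String)) (vs : List Int) (c : Int × String × String),
      ps.mapM (fun p => tier_rank_to_value? p.1 p.2) = some vs →
      ps.foldl
        (fun st p =>
          match st with
          | none => none
          | some (mv, mt, mr) =>
            match tier_rank_to_value? p.1 p.2 with
            | none => none
            | some v => if v > mv then some (v, p.1, p.2) else some (mv, mt, mr))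
        (some c) = some (loopA (ps.zip vs) c) := by
  intro ps
  induction ps with
  | nil => intro vs c h; simp at h; subst h; simp [loopA]
  | cons p ps ih =>
    intro vs c h
    rw [List.mapM_cons] at h
    cases hg : tier_rank_to_value? p.1 p.2 with
    | none => rw [hg] at h; simp at h
    | some v =>
      cases hm : ps.mapM (fun p => tier_rank_to_value? p.1 p.2) with
      | none => rw [hg, hm] at h; simp at h
      | some vs' =>
        rw [hg, hm] at h; simp at h
        obtain ⟨mv, mt, mr⟩ := c
        rw [← h]
        simp only [List.foldl_cons, hg, List.zip_cons_cons, loopA]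
        by_cases hv : v > mv
        · simp only [if_pos hv]
          exact ih vs' (v, p.1, p.2) hm
        · simp only [if_neg hv]
          exact ih vs' (mv, mt, mr) hm

lemma plumb_none :
    ∀ (ps : List (String × String)) (c : Int × String × String),
      ps.mapM (fun p => tier_rank_to_value? p.1 p.2) = none →
      ps.foldl
        (fun st p =>
          match st with
          | none => none
          | some (mv, mt, mr) =>
            match tier_rank_to_value? p.1 p.2 with
            | none => none
            | some v => if v > mv then some (v, p.1, p.2) else some (mv, mt, mr))
        (some c) = none := by
  intro ps
  induction ps with
  | nil => intro c h; simp at h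
  | cons p ps ih =>
    intro c h
    rw [List.mapM_cons] at h
    obtain ⟨mv, mt, mr⟩ := c
    cases hg : tier_rank_to_value? p.1 p.2 with
    | none =>
      simp only [List.foldl_cons, hg]
      exact fold_none ps
    | some v =>
      cases hm : ps.mapM (fun p => tier_rank_to_value? p.1 p.2) with
      | none =>
        simp only [List.foldl_cons, hg]
        by_cases hv : v > mv
        · simp only [if_pos hv]; exact ih _ hm
        · simp only [if_neg hv]; exact ih _ hm
      | some vs' => rw [hg, hm] at h; simp at h

lemma loopA_eq_pick :
    ∀ (ws : List ((String × String) × Int)) (c : Int × String × String),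
      loopA ws c =
        match pick ws with
        | none => c
        | some u => if u.2 > c.1 then (u.2, u.1.1, u.1.2) else c := by
  intro ws
  induction ws with
  | nil => intro c; simp [loopA, pick]
  | cons w ws ih =>
    intro c
    have hstep : loopA (w :: ws) c = loopA ws (if w.2 > c.1 then (w.2, w.1.1, w.1.2) else c) := by
      simp [loopA]
    rw [hstep, ih]
    cases hp : pick ws with
    | none => simp [pick, hp]
    | some u =>
      obtain ⟨⟨ut, ur⟩, uv⟩ := u
      obtain ⟨⟨pt, pr⟩, pv⟩ := w
      obtain ⟨cv, ct, cr⟩ := c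
      by_cases h1 : uv > pv <;> by_cases h2 : pv > cv <;> by_cases h3 : uv > cv <;>
        (try simp [pick, hp, h1, h2, h3]) <;> first | rfl | omega

lemma pick_eq_none_iff (ws : List ((String × String) × Int)) : pick ws = none ↔ ws = [] := by
  cases ws with
  | nil => simp [pick]
  | cons w ws => cases hp : pick ws <;> simp [pick, hp]

lemma pick_mem :
    ∀ (ws : List ((String × String) × Int)) (u : (String × String) × Int),
      pick ws = some u → u ∈ ws := by
  intro ws
  induction ws with
  | nil => intro u h; exact absurd h (by simp [pick])
  | cons w ws ih =>
    intro u h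
    cases hp : pick ws with
    | none =>
      simp only [pick, hp] at h
      simp at h
      subst h
      exact List.mem_cons_self
    | some u' =>
      simp only [pick, hp] at h
      simp at h
      split_ifs at h
      · subst h; exact List.mem_cons_of_mem _ (ih u' hp)
      · subst h; exact List.mem_cons_self

lemma max?_id_cons' (v : Int) (vs : List Int) (m : Int)
    (h : PySem.List.max? vs (fun y => y) = some m) :
    PySem.List.max? (v :: vs) (fun y => y) = some (max v m) := by
  cases vs with
  | nil => simp [PySem.List.max?] at h
  | cons w t =>
    rw [PySem.List.max?_id_cons] at h ⊢
    simp only [List.foldl_cons]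
    have := List.foldl_assoc (op := max) (l := t) (a₁ := v) (a₂ := w)
    rw [this, Option.some_inj.mp h]

-- B's pieces compute pick: max? finds pick's value, index? its first position, ps its pair
lemma pick_b :
    ∀ (ps : List (String × String)) (vs : List Int), vs.length = ps.length →
      ∀ u, pick (ps.zip vs) = some u →
        PySem.List.max? vs (fun v => v) = some u.2 ∧
        ∃ i, PySem.List.index? vs u.2 = some i ∧ ps[i]? = some u.1 := by
  intro ps
  induction ps with
  | nil => intro vs h u hp; simp at h; simp [h, pick] at hp
  | cons p ps ih =>
    intro vs h u hp
    cases vs with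
    | nil => simp at h
    | cons v vs' =>
      simp at h
      rw [List.zip_cons_cons] at hp
      simp only [pick] at hp
      cases hrest : pick (ps.zip vs') with
      | none =>
        rw [pick_eq_none_iff] at hrest
        have hvs' : vs' = [] := by
          cases vs' with
          | nil => rfl
          | cons a b => cases ps with
            | nil => simp at h
            | cons q qs => simp [List.zip_cons_cons] at hrest
        subst hvs'
        rw [hrest] at hp
        have hp' : some (p, v) = some u := hp
        have hu : u = (p, v) := (Option.some.inj hp').symm
        subst hu
        refine ⟨?_, 0, ?_, ?_⟩
        · rw [PySem.List.max?_id_cons]; rfl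
        · exact PySem.List.index?_cons_self v []
        · rfl
      | some u' =>
        rw [hrest] at hp
        have hp' : some (if v < u'.2 then u' else (p, v)) = some u := hp
        have hp'' := Option.some.inj hp'
        obtain ⟨hmax, i, hidx, hget⟩ := ih vs' h u' hrest
        by_cases hgt : v < u'.2
        · rw [if_pos hgt] at hp''
          have hu : u = u' := hp''.symm
          subst hu
          refine ⟨?_, i + 1, ?_, ?_⟩
          · rw [max?_id_cons' v vs' u.2 hmax, max_eq_right (le_of_lt hgt)]
          · rw [PySem.List.index?_cons_of_ne vs' (by omega : v ≠ u.2), hidx]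
            rfl
          · simpa using hget
        · rw [if_neg hgt] at hp''
          have hu : u = (p, v) := hp''.symm
          subst hu
          refine ⟨?_, 0, ?_, ?_⟩
          · rw [max?_id_cons' v vs' u'.2 hmax, max_eq_left (le_of_not_gt hgt)]
          · exact PySem.List.index?_cons_self v vs'
          · rfl

-- ===== VERDICT (by name: the statement is the Claim_ definition above) =====
theorem get_max_tier_and_rank_spec : Claim_equal_get_max_tier_and_rank := by
  intro tiers ranks _ _
  unfold Spec_get_max_tier_and_rank
  cases hm : (tiers.zip ranks).mapM (fun p => tier_rank_to_value? p.1 p.2) with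
  | none =>
    unfold get_max_tier_and_rank get_max_tier_and_rank_alt
    rw [plumb_none _ _ hm, hm]
  | some vs =>
    have hlen := mapM_some_len _ _ _ hm
    cases hp : pick ((tiers.zip ranks).zip vs) with
    | none =>
      rw [pick_eq_none_iff] at hp
      have hvs : vs = [] := by
        cases vs with
        | nil => rfl
        | cons a b =>
          cases hz : tiers.zip ranks with
          | nil => rw [hz] at hlen; simp at hlen
          | cons q qs => rw [hz] at hp; simp [List.zip_cons_cons] at hp
      subst hvs
      unfold get_max_tier_and_rank get_max_tier_and_rank_alt
      rw [plumb_some _ [] _ hm, loopA_eq_pick, hp, hm]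
      rfl
    | some u =>
      have humem := pick_mem _ _ hp
      have hvmem : u.2 ∈ vs := (List.of_mem_zip humem).2
      have hnn : (0:Int) ≤ u.2 := mapM_some_nonneg _ _ hm u.2 hvmem
      have hgt : (-1 : Int) < u.2 := by omega
      obtain ⟨hmax, i, hidx, hget⟩ := pick_b _ vs hlen u hp
      have hne : vs.isEmpty = false := by
        cases vs with
        | nil => simp at hvmem
        | cons a b => rfl
      have hi : i < (tiers.zip ranks).length := (List.getElem?_eq_some_iff.mp hget).1
      have hit : i < tiers.length := by rw [List.length_zip] at hi; omega
      have hir : i < ranks.length := by rw [List.length_zip] at hi; omega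
      have hu1 : u.1 = (tiers[i], ranks[i]) := by
        have h2 := (List.getElem?_eq_some_iff.mp hget).2
        rw [List.getElem_zip] at h2
        exact h2.symm
      have hA : get_max_tier_and_rank tiers ranks = (u.1.1, u.1.2) := by
        unfold get_max_tier_and_rank
        rw [plumb_some _ vs _ hm, loopA_eq_pick, hp]
        simp [hgt]
      have hB : get_max_tier_and_rank_alt tiers ranks = (tiers[i], ranks[i]) := by
        unfold get_max_tier_and_rank_alt
        rw [hm]
        show (if vs.isEmpty = true then ("", "")
          else
            match PySem.List.max? vs (fun v => v) with
            | none => ("", "")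
            | some m =>
              match PySem.List.index? vs m with
              | none => ("", "")
              | some idx =>
                match PySem.List.pyGet? tiers (idx : Int), PySem.List.pyGet? ranks (idx : Int) with
                | some t, some r => (t, r)
                | _, _ => ("", "")) = _
        rw [hne]
        simp only [Bool.false_eq_true, if_false]
        rw [hmax]
        show (match PySem.List.index? vs u.2 with
            | none => ("", "")
            | some idx =>
              match PySem.List.pyGet? tiers (idx : Int), PySem.List.pyGet? ranks (idx : Int) with
              | some t, some r => (t, r)
              | _, _ => ("", "")) = _
        rw [hidx]
        show (match PySem.List.pyGet? tiers (i : Int), PySem.List.pyGet? ranks (i : Int) with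
            | some t, some r => (t, r)
            | _, _ => ("", "")) = _
        rw [PySem.List.pyGet?_natCast, PySem.List.pyGet?_natCast,
          List.getElem?_eq_getElem hit, List.getElem?_eq_getElem hir]
      rw [hA, hB, hu1]
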